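-- pv_equiv track=rewrite | github.com/kuznetsovvj/education | algorithms/codeforces/1791b.py | check
-- ===== SOURCE A (Python) =====
-- def check(seq):
--     x, y = 0, 0
--     for c in seq:
--         if x == 1 and y == 1:
--             return "YES"
--         if c == 'L':
--             x -= 1
--         if c == 'R':
--             x += 1
--         if c == 'U':
--             y += 1
--         if c == 'D':
--             y -= 1
--     if x == 1 and y == 1:
--         return "YES"
--     return "NO"
-- ===== SOURCE B (Python) =====
-- def check(seq):
--     def step(p, c):
--         x, y = p
--         return (x + (c == 'R') - (c == 'L'), y + (c == 'U') - (c == 'D'))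
--     positions = [(0, 0)]
--     for c in seq:
--         positions.append(step(positions[-1], c))
--     return "YES" if (1, 1) in positions else "NO"
-- ===== Notes on version B (the rewrite author's own statement) =====
-- stated objective: alternative
-- what changed: B builds the whole trajectory of visited coordinates (a scan producing all prefix positions) and then does a single membership test for (1,1), instead of A's streaming loop with in-place coordinate updates and an early return.
import Mathlib
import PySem

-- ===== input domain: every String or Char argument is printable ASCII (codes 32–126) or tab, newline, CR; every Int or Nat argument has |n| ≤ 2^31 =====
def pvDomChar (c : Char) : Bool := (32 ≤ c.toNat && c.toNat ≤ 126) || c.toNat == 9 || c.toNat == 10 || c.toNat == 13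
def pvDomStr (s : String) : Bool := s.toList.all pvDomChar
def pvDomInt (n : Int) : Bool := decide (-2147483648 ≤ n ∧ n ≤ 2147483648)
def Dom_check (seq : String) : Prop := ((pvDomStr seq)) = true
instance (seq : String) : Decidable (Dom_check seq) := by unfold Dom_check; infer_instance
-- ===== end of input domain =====

-- B computes the whole trajectory of visited coordinates and then tests membership of (1,1),
-- instead of A's streaming update loop with early return; same cost, different decomposition.

-- ===== PORT A =====
-- the for-loop of A: state (x, y), early return on (1, 1), four independent ifs in order
def checkLoop : List Char → Int → Int → String
  | [], x, y => if x = 1 ∧ y = 1 then "YES" else "NO"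
  | c :: cs, x, y =>
    if x = 1 ∧ y = 1 then "YES"
    else
      let x := if c = 'L' then x - 1 else x
      let x := if c = 'R' then x + 1 else x
      let y := if c = 'U' then y + 1 else y
      let y := if c = 'D' then y - 1 else y
      checkLoop cs x y

def check (seq : String) : String := checkLoop seq.toList 0 0

-- ===== PORT B =====
-- Source B's step: one arithmetic move per character (bools coerce to 0/1)
def stepB (p : Int × Int) (c : Char) : Int × Int :=
  (p.1 + (if c = 'R' then 1 else 0) - (if c = 'L' then 1 else 0),
   p.2 + (if c = 'U' then 1 else 0) - (if c = 'D' then 1 else 0))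

-- Source B's trajectory list: positions = [(0,0)] then append step(positions[-1], c) for each c
def trajB : Int × Int → List Char → List (Int × Int)
  | p, [] => [p]
  | p, c :: cs => p :: trajB (stepB p c) cs

def check_alt (seq : String) : String :=
  if ((1 : Int), (1 : Int)) ∈ trajB (0, 0) seq.toList then "YES" else "NO"

-- ===== PRECONDITION & SPEC =====
def Spec_check (seq : String) (out : String) : Prop := out = check_alt seq
instance (seq : String) (out : String) : Decidable (Spec_check seq out) := by unfold Spec_check; infer_instance

-- ===== CLAIM (what is proved, stated in full; the proofs are below) =====
def Claim_equal_check : Prop := ∀ (seq : String), Dom_check seq → Spec_check seq (check seq)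

-- ===== LEMMAS AND PROOFS =====
theorem checkLoop_eq_trajB (cs : List Char) : ∀ (x y : Int),
    checkLoop cs x y = if ((1 : Int), (1 : Int)) ∈ trajB (x, y) cs then "YES" else "NO" := by
  induction cs with
  | nil =>
    intro x y
    simp only [checkLoop, trajB, List.mem_singleton, Prod.mk.injEq]
    by_cases h : x = 1 ∧ y = 1
    · simp [h.1, h.2]
    · rw [if_neg h, if_neg (by tauto)]
  | cons c cs ih =>
    intro x y
    simp only [checkLoop, trajB, List.mem_cons, Prod.mk.injEq]
    by_cases h : x = 1 ∧ y = 1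
    · rw [if_pos h, if_pos (Or.inl ⟨h.1.symm, h.2.symm⟩)]
    · rw [if_neg h, ih]
      have hstep : stepB (x, y) c
          = (if c = 'R' then (if c = 'L' then x - 1 else x) + 1 else if c = 'L' then x - 1 else x,
             if c = 'D' then (if c = 'U' then y + 1 else y) - 1 else if c = 'U' then y + 1 else y) := by
        simp only [stepB]
        refine Prod.ext ?_ ?_ <;> simp only [] <;> split_ifs <;> omega
      rw [hstep]
      congr 1
      simp only [eq_iff_iff]
      constructor
      · exact fun hm => Or.inr hm
      · rintro (⟨h1, h2⟩ | hm)
        · exact absurd ⟨h1.symm, h2.symm⟩ h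
        · exact hm

-- ===== VERDICT (by name: the statement is the Claim_ definition above) =====
theorem check_spec : Claim_equal_check := by
  intro seq _
  unfold Spec_check check check_alt
  exact checkLoop_eq_trajB seq.toList 0 0
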